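-- pv_equiv track=rewrite | github.com/appleeatsapples-lang/SIRR | Engine/modules/human_design.py | _motor_to_throat
-- ===== SOURCE A (Python) =====
-- from collections import deque
--
-- GATE_CENTER = {
--     1:"G", 2:"G", 3:"Sacral", 4:"Ajna", 5:"Sacral", 6:"Solar Plexus",
--     7:"G", 8:"Throat", 9:"Sacral", 10:"G", 11:"Ajna", 12:"Throat",
--     13:"G", 14:"Sacral", 15:"G", 16:"Throat", 17:"Ajna", 18:"Spleen",
--     19:"Root", 20:"Throat", 21:"Heart", 22:"Solar Plexus", 23:"Throat",
--     24:"Ajna", 25:"G", 26:"Heart", 27:"Sacral", 28:"Spleen", 29:"Sacral",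
--     30:"Solar Plexus", 31:"Throat", 32:"Spleen", 33:"Throat", 34:"Sacral",
--     35:"Throat", 36:"Solar Plexus", 37:"Solar Plexus", 38:"Root", 39:"Root",
--     40:"Heart", 41:"Root", 42:"Sacral", 43:"Ajna", 44:"Spleen", 45:"Throat",
--     46:"G", 47:"Ajna", 48:"Spleen", 49:"Solar Plexus", 50:"Spleen",
--     51:"Heart", 52:"Root", 53:"Root", 54:"Root", 55:"Solar Plexus",
--     56:"Throat", 57:"Spleen", 58:"Root", 59:"Sacral", 60:"Root", 61:"Head",
--     62:"Throat", 63:"Head", 64:"Head",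
-- }
--
-- MOTOR_CENTERS = {"Sacral", "Root", "Solar Plexus", "Heart"}
--
-- def _motor_to_throat(defined_channels: list, defined_centers: set) -> bool:
--     """BFS: check if any motor center connects to Throat through defined channels."""
--     if "Throat" not in defined_centers:
--         return False
--
--     # Build adjacency from defined channels
--     adj: dict[str, set[str]] = {}
--     for ch in defined_channels:
--         g1, g2 = ch["gates"]
--         c1, c2 = GATE_CENTER[g1], GATE_CENTER[g2]
--         if c1 != c2:  # only cross-center channels matter
--             adj.setdefault(c1, set()).add(c2)
--             adj.setdefault(c2, set()).add(c1)
--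
--     # BFS from each motor center
--     for motor in MOTOR_CENTERS:
--         if motor not in defined_centers:
--             continue
--         visited = {motor}
--         queue = deque([motor])
--         while queue:
--             current = queue.popleft()
--             if current == "Throat":
--                 return True
--             for neighbor in adj.get(current, []):
--                 if neighbor in defined_centers and neighbor not in visited:
--                     visited.add(neighbor)
--                     queue.append(neighbor)
--     return False
-- ===== SOURCE B (Python) =====
-- GATE_CENTER = {
--     1:"G", 2:"G", 3:"Sacral", 4:"Ajna", 5:"Sacral", 6:"Solar Plexus",
--     7:"G", 8:"Throat", 9:"Sacral", 10:"G", 11:"Ajna", 12:"Throat",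
--     13:"G", 14:"Sacral", 15:"G", 16:"Throat", 17:"Ajna", 18:"Spleen",
--     19:"Root", 20:"Throat", 21:"Heart", 22:"Solar Plexus", 23:"Throat",
--     24:"Ajna", 25:"G", 26:"Heart", 27:"Sacral", 28:"Spleen", 29:"Sacral",
--     30:"Solar Plexus", 31:"Throat", 32:"Spleen", 33:"Throat", 34:"Sacral",
--     35:"Throat", 36:"Solar Plexus", 37:"Solar Plexus", 38:"Root", 39:"Root",
--     40:"Heart", 41:"Root", 42:"Sacral", 43:"Ajna", 44:"Spleen", 45:"Throat",
--     46:"G", 47:"Ajna", 48:"Spleen", 49:"Solar Plexus", 50:"Spleen",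
--     51:"Heart", 52:"Root", 53:"Root", 54:"Root", 55:"Solar Plexus",
--     56:"Throat", 57:"Spleen", 58:"Root", 59:"Sacral", 60:"Root", 61:"Head",
--     62:"Throat", 63:"Head", 64:"Head",
-- }
--
-- MOTOR_CENTERS = {"Sacral", "Root", "Solar Plexus", "Heart"}
--
-- def _motor_to_throat(defined_channels: list, defined_centers: set) -> bool:
--     """Saturate the connected component of Throat instead of BFS from each motor."""
--     if "Throat" not in defined_centers:
--         return False
--     # edges between distinct defined centers
--     edges = []
--     for ch in defined_channels:
--         g1, g2 = ch["gates"]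
--         c1, c2 = GATE_CENTER[g1], GATE_CENTER[g2]
--         if c1 != c2 and c1 in defined_centers and c2 in defined_centers:
--             edges.append((c1, c2))
--     # grow the component of Throat until a full pass changes nothing
--     comp = {"Throat"}
--     changed = True
--     while changed:
--         changed = False
--         for a, b in edges:
--             if (a in comp) != (b in comp):
--                 comp.add(a)
--                 comp.add(b)
--                 changed = True
--     return any(m in comp for m in MOTOR_CENTERS)
-- ===== Notes on version B (the rewrite author's own statement) =====
-- stated objective: alternative
-- what changed: Replaces BFS launched from each motor center (adjacency dict + queue + visited set per motor) with one saturation of the connected component of Throat over the defined-center edge list, then a single membership test of the motor centers.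
import Mathlib
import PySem

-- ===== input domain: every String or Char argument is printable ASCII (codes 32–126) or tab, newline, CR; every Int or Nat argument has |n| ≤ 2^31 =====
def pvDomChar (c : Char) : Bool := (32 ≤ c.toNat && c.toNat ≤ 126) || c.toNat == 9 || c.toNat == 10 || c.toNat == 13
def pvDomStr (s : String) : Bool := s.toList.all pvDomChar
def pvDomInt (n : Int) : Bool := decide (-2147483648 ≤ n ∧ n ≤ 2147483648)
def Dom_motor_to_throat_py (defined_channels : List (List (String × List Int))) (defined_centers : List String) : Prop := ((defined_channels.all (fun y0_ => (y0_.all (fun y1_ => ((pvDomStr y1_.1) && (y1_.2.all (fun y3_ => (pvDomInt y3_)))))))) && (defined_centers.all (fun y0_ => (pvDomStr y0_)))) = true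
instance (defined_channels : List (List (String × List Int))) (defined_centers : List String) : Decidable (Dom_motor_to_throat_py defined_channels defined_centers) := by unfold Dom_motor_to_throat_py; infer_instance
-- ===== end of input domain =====

-- B replaces A's per-motor BFS by one saturation of Throat's connected component; equal return value on Pre_.

-- shared module constants (GATE_CENTER, MOTOR_CENTERS)
def pvGateCenter : List (Int × String) := [
  (1,"G"), (2,"G"), (3,"Sacral"), (4,"Ajna"), (5,"Sacral"), (6,"Solar Plexus"),
  (7,"G"), (8,"Throat"), (9,"Sacral"), (10,"G"), (11,"Ajna"), (12,"Throat"),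
  (13,"G"), (14,"Sacral"), (15,"G"), (16,"Throat"), (17,"Ajna"), (18,"Spleen"),
  (19,"Root"), (20,"Throat"), (21,"Heart"), (22,"Solar Plexus"), (23,"Throat"),
  (24,"Ajna"), (25,"G"), (26,"Heart"), (27,"Sacral"), (28,"Spleen"), (29,"Sacral"),
  (30,"Solar Plexus"), (31,"Throat"), (32,"Spleen"), (33,"Throat"), (34,"Sacral"),
  (35,"Throat"), (36,"Solar Plexus"), (37,"Solar Plexus"), (38,"Root"), (39,"Root"),
  (40,"Heart"), (41,"Root"), (42,"Sacral"), (43,"Ajna"), (44,"Spleen"), (45,"Throat"),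
  (46,"G"), (47,"Ajna"), (48,"Spleen"), (49,"Solar Plexus"), (50,"Spleen"),
  (51,"Heart"), (52,"Root"), (53,"Root"), (54,"Root"), (55,"Solar Plexus"),
  (56,"Throat"), (57,"Spleen"), (58,"Root"), (59,"Sacral"), (60,"Root"), (61,"Head"),
  (62,"Throat"), (63,"Head"), (64,"Head")]

def pvMotors : List String := ["Sacral", "Root", "Solar Plexus", "Heart"]

-- g1, g2 = ch["gates"]; c1, c2 = GATE_CENTER[g1], GATE_CENTER[g2]  (shared per-channel lines of A and B;
-- none = the KeyError/ValueError Python raises there, excluded by Pre_)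
def pvChCenters (ch : List (String × List Int)) : Option (String × String) :=
  match List.lookup "gates" ch with
  | some [g1, g2] =>
    match List.lookup g1 pvGateCenter, List.lookup g2 pvGateCenter with
    | some c1, some c2 => some (c1, c2)
    | _, _ => none
  | _ => none

-- ===== PORT A =====
-- one iteration of A's adjacency-building loop
def pvAdjStep (adj : PySem.Dict String (PySem.Set String)) (ch : List (String × List Int)) :
    Option (PySem.Dict String (PySem.Set String)) :=
  (pvChCenters ch).map (fun cc =>
    if cc.1 ≠ cc.2 then
      -- adj.setdefault(c1, set()).add(c2); adj.setdefault(c2, set()).add(c1)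
      let adj1 := PySem.Dict.insert adj cc.1 (PySem.Set.add (PySem.Dict.getD adj cc.1 PySem.Set.empty) cc.2)
      PySem.Dict.insert adj1 cc.2 (PySem.Set.add (PySem.Dict.getD adj1 cc.2 PySem.Set.empty) cc.1)
    else adj)

def pvBuildAdj (chs : List (List (String × List Int))) : Option (PySem.Dict String (PySem.Set String)) :=
  chs.foldl (fun acc ch => acc.bind fun adj => pvAdjStep adj ch) (some PySem.Dict.empty)

-- the `for neighbor in adj.get(current, [])` body of A's BFS (state: visited, queue)
def pvVisitStep (dc : List String) (vq : PySem.Set String × List String) (n : String) :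
    PySem.Set String × List String :=
  if dc.contains n && !(vq.1.contains n) then (PySem.Set.add vq.1 n, vq.2 ++ [n]) else vq

-- A's `while queue` loop; the fuel (len(defined_centers) + 1) only makes it total, it never runs out
def pvBFS (adj : PySem.Dict String (PySem.Set String)) (dc : List String) :
    PySem.Set String → List String → Nat → Bool
  | _, _, 0 => false
  | _, [], _ + 1 => false
  | visited, current :: rest, fuel + 1 =>
    if current = "Throat" then true
    else
      let vq := (PySem.Dict.getD adj current PySem.Set.empty).foldl (pvVisitStep dc) (visited, rest)
      pvBFS adj dc vq.1 vq.2 fuel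

def motor_to_throat_py (defined_channels : List (List (String × List Int))) (defined_centers : List String) : Bool :=
  if !(defined_centers.contains "Throat") then false
  else
    match pvBuildAdj defined_channels with
    | none => false   -- Python raises here; excluded by Pre_
    | some adj =>
      pvMotors.any (fun motor =>
        if defined_centers.contains motor then
          pvBFS adj defined_centers [motor] [motor] (defined_centers.length + 1)
        else false)

-- ===== PORT B =====
-- one iteration of B's edge-collecting loop
def pvEdgeStep (dc : List String) (es : List (String × String)) (ch : List (String × List Int)) :
    Option (List (String × String)) :=
  (pvChCenters ch).map (fun cc =>
    if cc.1 ≠ cc.2 ∧ cc.1 ∈ dc ∧ cc.2 ∈ dc then es ++ [cc] else es)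

def pvEdges (chs : List (List (String × List Int))) (dc : List String) : Option (List (String × String)) :=
  chs.foldl (fun acc ch => acc.bind fun es => pvEdgeStep dc es ch) (some [])

-- the `for a, b in edges` body of B's saturation pass (state: comp, changed)
def pvGrowStep (st : PySem.Set String × Bool) (e : String × String) : PySem.Set String × Bool :=
  if st.1.contains e.1 != st.1.contains e.2 then
    (PySem.Set.add (PySem.Set.add st.1 e.1) e.2, true)
  else st

def pvGrow (edges : List (String × String)) (st : PySem.Set String × Bool) : PySem.Set String × Bool :=
  edges.foldl pvGrowStep st

-- B's `while changed` loop; the fuel (2*len(edges) + 1) only makes it total, it never runs out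
def pvSat (edges : List (String × String)) : PySem.Set String → Nat → PySem.Set String
  | comp, 0 => comp
  | comp, fuel + 1 =>
    let st := pvGrow edges (comp, false)
    if st.2 then pvSat edges st.1 fuel else st.1

def motor_to_throat_py_alt (defined_channels : List (List (String × List Int))) (defined_centers : List String) : Bool :=
  if !(defined_centers.contains "Throat") then false
  else
    match pvEdges defined_channels defined_centers with
    | none => false   -- Python raises here; excluded by Pre_
    | some es =>
      (pvMotors.any (fun m => (pvSat es ["Throat"] (2 * es.length + 1)).contains m))

-- ===== PRECONDITION & SPEC =====
-- Pre_ excludes exactly the inputs where Python raises (KeyError/ValueError): a channel without a "gates"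
-- key, a gates list whose length is not 2, or a gate outside GATE_CENTER — and only when "Throat" is a
-- defined center, since both programs return False before ever scanning the channels otherwise.
def Pre_motor_to_throat_py (defined_channels : List (List (String × List Int))) (defined_centers : List String) : Prop :=
  "Throat" ∈ defined_centers →
    ∀ ch ∈ defined_channels, ∃ gs ∈ (List.lookup "gates" ch).toList,
      gs.length = 2 ∧ ∀ g ∈ gs, (List.lookup g pvGateCenter).isSome = true

instance (defined_channels : List (List (String × List Int))) (defined_centers : List String) : Decidable (Pre_motor_to_throat_py defined_channels defined_centers) := by unfold Pre_motor_to_throat_py; infer_instance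

def pvWitness_motor_to_throat_py : (List (List (String × List Int))) × List String :=
  ([[("gates", [34, 20])]], ["Throat", "Sacral"])

def Spec_motor_to_throat_py (defined_channels : List (List (String × List Int))) (defined_centers : List String) (out : Bool) : Prop := out = motor_to_throat_py_alt defined_channels defined_centers
instance (defined_channels : List (List (String × List Int))) (defined_centers : List String) (out : Bool) : Decidable (Spec_motor_to_throat_py defined_channels defined_centers out) := by unfold Spec_motor_to_throat_py; infer_instance

-- ===== CLAIM (what is proved, stated in full; the proofs are below) =====
def Claim_equal_motor_to_throat_py : Prop := ∀ (defined_channels : List (List (String × List Int))) (defined_centers : List String), Dom_motor_to_throat_py defined_channels defined_centers → Pre_motor_to_throat_py defined_channels defined_centers → Spec_motor_to_throat_py defined_channels defined_centers (motor_to_throat_py defined_channels defined_centers)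

-- ===== LEMMAS AND PROOFS =====

-- some channel has centers (c, d), in that order / in either orientation
def pvEdgeChDir (ch : List (String × List Int)) (c d : String) : Prop :=
  pvChCenters ch = some (c, d) ∧ c ≠ d

def pvEdgeCh (chs : List (List (String × List Int))) (c d : String) : Prop :=
  ∃ ch ∈ chs, pvEdgeChDir ch c d ∨ pvEdgeChDir ch d c

-- the step relation of A's BFS, and B's edge relation
def pvRA (adj : PySem.Dict String (PySem.Set String)) (dc : List String) (c d : String) : Prop :=
  d ∈ PySem.Dict.getD adj c PySem.Set.empty ∧ d ∈ dc

def pvRB (es : List (String × String)) (c d : String) : Prop := (c, d) ∈ es ∨ (d, c) ∈ es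

def pvReachA (adj : PySem.Dict String (PySem.Set String)) (dc : List String) : String → String → Prop :=
  Relation.ReflTransGen (pvRA adj dc)

def pvReachB (es : List (String × String)) : String → String → Prop :=
  Relation.ReflTransGen (pvRB es)

def pvCnt (dc : List String) (v : PySem.Set String) : Nat :=
  ((PySem.List.dedup dc).filter (fun c => !(v.contains c))).length

def pvEndpoints (es : List (String × String)) : List String := es.flatMap (fun e => [e.1, e.2])

-- unfolding equations (definitional)
lemma pvBFS_zero (adj : PySem.Dict String (PySem.Set String)) (dc : List String)
    (v : PySem.Set String) (q : List String) : pvBFS adj dc v q 0 = false := rfl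

lemma pvBFS_nil (adj : PySem.Dict String (PySem.Set String)) (dc : List String)
    (v : PySem.Set String) (fuel : Nat) : pvBFS adj dc v [] (fuel + 1) = false := rfl

lemma pvBFS_cons (adj : PySem.Dict String (PySem.Set String)) (dc : List String)
    (v : PySem.Set String) (current : String) (rest : List String) (fuel : Nat) :
    pvBFS adj dc v (current :: rest) (fuel + 1) =
      (if current = "Throat" then true
       else pvBFS adj dc
        ((PySem.Dict.getD adj current PySem.Set.empty).foldl (pvVisitStep dc) (v, rest)).1
        ((PySem.Dict.getD adj current PySem.Set.empty).foldl (pvVisitStep dc) (v, rest)).2 fuel) := rfl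

lemma pvSat_succ (es : List (String × String)) (comp : PySem.Set String) (fuel : Nat) :
    pvSat es comp (fuel + 1) =
      (if (pvGrow es (comp, false)).2 then pvSat es (pvGrow es (comp, false)).1 fuel
       else (pvGrow es (comp, false)).1) := rfl

lemma pvEndpoints_cons (e : String × String) (es : List (String × String)) :
    pvEndpoints (e :: es) = e.1 :: e.2 :: pvEndpoints es := rfl

-- small glue facts ---------------------------------------------------------

lemma pv_bool_eq {a b : Bool} (h : a = true ↔ b = true) : a = b := by
  cases a <;> cases b <;> simp_all

lemma pv_reach_subset {r : String → String → Prop} {S : List String}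
    (hcl : ∀ x ∈ S, ∀ y, r x y → y ∈ S) {a b : String}
    (h : Relation.ReflTransGen r a b) (ha : a ∈ S) : b ∈ S := by
  induction h with
  | refl => exact ha
  | tail _ hstep ih => exact hcl _ ih _ hstep

lemma pv_reach_symm {r : String → String → Prop} (hs : ∀ a b, r a b → r b a)
    {a b : String} (h : Relation.ReflTransGen r a b) : Relation.ReflTransGen r b a := by
  induction h with
  | refl => exact Relation.ReflTransGen.refl
  | tail _ hstep ih => exact Relation.ReflTransGen.head (hs _ _ hstep) ih

lemma pv_filter_ne_length {n : String} : ∀ {L : List String}, n ∈ L →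
    (L.filter (fun c => !(c == n))).length < L.length := by
  intro L hL
  induction L with
  | nil => cases hL
  | cons a L ih =>
    by_cases ha : a = n
    · subst ha
      rw [List.filter_cons_of_neg (by simp)]
      exact Nat.lt_succ_of_le (List.length_filter_le _ _)
    · have hnL : n ∈ L := by
        rcases List.mem_cons.mp hL with h | h
        · exact absurd h.symm ha
        · exact h
      rw [List.filter_cons_of_pos (by simp [ha])]
      simp only [List.length_cons]
      exact Nat.succ_lt_succ (ih hnL)

lemma pv_nodup_length_le {l l' : List String} (hnd : l.Nodup) (hsub : ∀ x ∈ l, x ∈ l') :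
    l.length ≤ l'.length :=
  (hnd.subperm (fun {x} hx => hsub x hx)).length_le

lemma pvCnt_le (dc : List String) (v : PySem.Set String) : pvCnt dc v ≤ dc.length := by
  unfold pvCnt
  calc ((PySem.List.dedup dc).filter _).length ≤ (PySem.List.dedup dc).length :=
        List.length_filter_le _ _
    _ ≤ dc.length := pv_nodup_length_le (PySem.List.nodup_dedup dc)
        (fun x hx => (PySem.List.mem_dedup dc x).mp hx)

lemma pvCnt_add {dc : List String} {v : PySem.Set String} {n : String}
    (hnd : n ∈ dc) (hnv : n ∉ v) : pvCnt dc (PySem.Set.add v n) + 1 ≤ pvCnt dc v := by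
  unfold pvCnt
  have hpt : ∀ c ∈ PySem.List.dedup dc,
      (!((PySem.Set.add v n).contains c)) = ((!(c == n)) && (!(v.contains c))) := by
    intro c _
    rw [PySem.Set.add_of_not_mem hnv]
    by_cases hc : c = n
    · subst hc; simp
    · simp [hc]
  rw [List.filter_congr hpt, ← List.filter_filter]
  have hmem : n ∈ (PySem.List.dedup dc).filter (fun c => !(v.contains c)) := by
    rw [List.mem_filter]
    exact ⟨(PySem.List.mem_dedup dc n).mpr hnd, by simpa using hnv⟩
  have := pv_filter_ne_length hmem
  omega

lemma pv_add_len (s : PySem.Set String) (x : String) :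
    s.length ≤ (PySem.Set.add s x).length := by
  rw [PySem.Set.add_eq_ite]
  split
  · exact le_refl _
  · simp

-- characterizing A's adjacency dict ----------------------------------------

lemma pvAdjStep_mem {adj adj2 : PySem.Dict String (PySem.Set String)} {ch : List (String × List Int)}
    (h : pvAdjStep adj ch = some adj2) (c d : String) :
    d ∈ PySem.Dict.getD adj2 c PySem.Set.empty ↔
      d ∈ PySem.Dict.getD adj c PySem.Set.empty ∨ (pvEdgeChDir ch c d ∨ pvEdgeChDir ch d c) := by
  unfold pvAdjStep at h
  rw [Option.map_eq_some_iff] at h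
  obtain ⟨cc, hcc, hf⟩ := h
  obtain ⟨c1, c2⟩ := cc
  dsimp only at hf
  by_cases hne : c1 = c2
  · rw [if_neg (by simp [hne])] at hf
    subst hf
    subst hne
    have hdir : ¬ (pvEdgeChDir ch c d ∨ pvEdgeChDir ch d c) := by
      unfold pvEdgeChDir
      rw [hcc]
      simp only [Option.some.injEq, Prod.mk.injEq]
      rintro (⟨⟨rfl, h2⟩, hcd⟩ | ⟨⟨rfl, h2⟩, hcd⟩) <;> exact hcd h2
    tauto
  · rw [if_pos hne] at hf
    subst hf
    have hdir : (pvEdgeChDir ch c d ∨ pvEdgeChDir ch d c) ↔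
        ((c = c1 ∧ d = c2) ∨ (c = c2 ∧ d = c1)) := by
      unfold pvEdgeChDir
      rw [hcc]
      simp only [Option.some.injEq, Prod.mk.injEq]
      constructor
      · rintro (⟨⟨rfl, rfl⟩, _⟩ | ⟨⟨rfl, rfl⟩, _⟩)
        · exact Or.inl ⟨rfl, rfl⟩
        · exact Or.inr ⟨rfl, rfl⟩
      · rintro (⟨rfl, rfl⟩ | ⟨rfl, rfl⟩)
        · exact Or.inl ⟨⟨rfl, rfl⟩, hne⟩
        · exact Or.inr ⟨⟨rfl, rfl⟩, hne⟩
    rw [hdir]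
    by_cases hc2 : c = c2
    · subst hc2
      rw [PySem.Dict.getD_insert_self]
      rw [PySem.Dict.getD_insert_of_ne _ _ _ (fun hcc' => hne hcc'.symm)]
      rw [PySem.Set.mem_add]
      constructor
      · rintro (hd | rfl)
        · exact Or.inl hd
        · exact Or.inr (Or.inr ⟨rfl, rfl⟩)
      · rintro (hd | (⟨rfl, rfl⟩ | ⟨_, rfl⟩))
        · exact Or.inl hd
        · exact absurd rfl hne
        · exact Or.inr rfl
    · rw [PySem.Dict.getD_insert_of_ne _ _ _ hc2]
      by_cases hc1 : c = c1
      · subst hc1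
        rw [PySem.Dict.getD_insert_self, PySem.Set.mem_add]
        constructor
        · rintro (hd | rfl)
          · exact Or.inl hd
          · exact Or.inr (Or.inl ⟨rfl, rfl⟩)
        · rintro (hd | (⟨_, rfl⟩ | ⟨rfl, rfl⟩))
          · exact Or.inl hd
          · exact Or.inr rfl
          · exact absurd rfl hc2
      · rw [PySem.Dict.getD_insert_of_ne _ _ _ hc1]
        constructor
        · exact Or.inl
        · rintro (hd | (⟨rfl, _⟩ | ⟨rfl, _⟩))
          · exact hd
          · exact absurd rfl hc1
          · exact absurd rfl hc2

lemma pvAdj_fold_none : ∀ (chs : List (List (String × List Int))),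
    chs.foldl (fun acc ch => acc.bind fun adj => pvAdjStep adj ch) none = none := by
  intro chs
  induction chs with
  | nil => rfl
  | cons ch chs ih => simpa using ih

lemma pvAdj_fold_char : ∀ (chs : List (List (String × List Int)))
    (acc adj : PySem.Dict String (PySem.Set String)),
    chs.foldl (fun acc ch => acc.bind fun adj => pvAdjStep adj ch) (some acc) = some adj →
    ∀ c d, (d ∈ PySem.Dict.getD adj c PySem.Set.empty ↔
      d ∈ PySem.Dict.getD acc c PySem.Set.empty ∨ pvEdgeCh chs c d) := by
  intro chs
  induction chs with
  | nil =>
    intro acc adj h c d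
    have := Option.some.inj h
    subst this
    simp [pvEdgeCh]
  | cons ch chs ih =>
    intro acc adj h c d
    simp only [List.foldl_cons] at h
    rcases hstep : pvAdjStep acc ch with _ | acc2
    · rw [show ((some acc).bind fun adj => pvAdjStep adj ch) = none from hstep] at h
      rw [pvAdj_fold_none chs] at h
      simp at h
    · rw [show ((some acc).bind fun adj => pvAdjStep adj ch) = some acc2 from hstep] at h
      have hmem := pvAdjStep_mem hstep c d
      rw [ih acc2 adj h c d, hmem]
      have hch : pvEdgeCh (ch :: chs) c d ↔
          (pvEdgeChDir ch c d ∨ pvEdgeChDir ch d c) ∨ pvEdgeCh chs c d := by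
        unfold pvEdgeCh
        simp only [List.mem_cons]
        constructor
        · rintro ⟨ch', (rfl | hch'), hd⟩
          · exact Or.inl hd
          · exact Or.inr ⟨ch', hch', hd⟩
        · rintro (hd | ⟨ch', hch', hd⟩)
          · exact ⟨ch, Or.inl rfl, hd⟩
          · exact ⟨ch', Or.inr hch', hd⟩
      rw [hch]
      tauto

lemma pvAdj_mem {chs : List (List (String × List Int))} {adj : PySem.Dict String (PySem.Set String)}
    (hA : pvBuildAdj chs = some adj) (c d : String) :
    d ∈ PySem.Dict.getD adj c PySem.Set.empty ↔ pvEdgeCh chs c d := by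
  rw [pvAdj_fold_char chs PySem.Dict.empty adj hA c d]
  have hemp : d ∉ PySem.Dict.getD PySem.Dict.empty c PySem.Set.empty := by
    intro hd
    exact absurd hd (by simp [PySem.Dict.getD, PySem.Dict.get?, PySem.Dict.empty, PySem.Set.empty])
  tauto

-- characterizing B's edge list ----------------------------------------------

lemma pvEdgeStep_mem {dc : List String} {es es2 : List (String × String)} {ch : List (String × List Int)}
    (h : pvEdgeStep dc es ch = some es2) (p : String × String) :
    p ∈ es2 ↔ p ∈ es ∨ (pvEdgeChDir ch p.1 p.2 ∧ p.1 ∈ dc ∧ p.2 ∈ dc) := by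
  unfold pvEdgeStep at h
  rw [Option.map_eq_some_iff] at h
  obtain ⟨cc, hcc, hf⟩ := h
  have hdir : ∀ c d : String, pvEdgeChDir ch c d ↔ (cc = (c, d) ∧ c ≠ d) := by
    intro c d
    unfold pvEdgeChDir
    rw [hcc]
    simp [Option.some.injEq]
  by_cases hcond : cc.1 ≠ cc.2 ∧ cc.1 ∈ dc ∧ cc.2 ∈ dc
  · rw [if_pos hcond] at hf
    subst hf
    rw [List.mem_append, List.mem_singleton, hdir p.1 p.2]
    constructor
    · rintro (hp | rfl)
      · exact Or.inl hp
      · exact Or.inr ⟨⟨Prod.mk.eta.symm, hcond.1⟩, hcond.2.1, hcond.2.2⟩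
    · rintro (hp | ⟨⟨hcc', _⟩, _, _⟩)
      · exact Or.inl hp
      · right
        rw [hcc']
  · rw [if_neg hcond] at hf
    subst hf
    rw [hdir p.1 p.2]
    constructor
    · exact Or.inl
    · rintro (hp | ⟨⟨hcc', hne⟩, h1, h2⟩)
      · exact hp
      · subst hcc'
        exact absurd ⟨hne, h1, h2⟩ hcond

lemma pvEdges_fold_none : ∀ (chs : List (List (String × List Int))) (dc : List String),
    chs.foldl (fun acc ch => acc.bind fun es => pvEdgeStep dc es ch) none = none := by
  intro chs dc
  induction chs with
  | nil => rfl
  | cons ch chs ih => simpa using ih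

lemma pvEdges_fold_char : ∀ (chs : List (List (String × List Int))) (dc : List String)
    (acc es : List (String × String)),
    chs.foldl (fun acc ch => acc.bind fun es => pvEdgeStep dc es ch) (some acc) = some es →
    ∀ p : String × String, (p ∈ es ↔ p ∈ acc ∨
      ∃ ch ∈ chs, pvEdgeChDir ch p.1 p.2 ∧ p.1 ∈ dc ∧ p.2 ∈ dc) := by
  intro chs
  induction chs with
  | nil =>
    intro dc acc es h p
    have := Option.some.inj h
    subst this
    simp
  | cons ch chs ih =>
    intro dc acc es h p
    simp only [List.foldl_cons] at h
    rcases hstep : pvEdgeStep dc acc ch with _ | acc2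
    · rw [show ((some acc).bind fun es => pvEdgeStep dc es ch) = none from hstep] at h
      rw [pvEdges_fold_none chs dc] at h
      simp at h
    · rw [show ((some acc).bind fun es => pvEdgeStep dc es ch) = some acc2 from hstep] at h
      have hmem := pvEdgeStep_mem hstep p
      rw [ih dc acc2 es h p, hmem]
      simp only [List.mem_cons]
      constructor
      · rintro ((hp | hd) | ⟨ch', hch', hd⟩)
        · exact Or.inl hp
        · exact Or.inr ⟨ch, Or.inl rfl, hd⟩
        · exact Or.inr ⟨ch', Or.inr hch', hd⟩
      · rintro (hp | ⟨ch', (rfl | hch'), hd⟩)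
        · exact Or.inl (Or.inl hp)
        · exact Or.inl (Or.inr hd)
        · exact Or.inr ⟨ch', hch', hd⟩

lemma pvEdges_mem {chs : List (List (String × List Int))} {dc : List String}
    {es : List (String × String)} (hE : pvEdges chs dc = some es) (p : String × String) :
    p ∈ es ↔ ∃ ch ∈ chs, pvEdgeChDir ch p.1 p.2 ∧ p.1 ∈ dc ∧ p.2 ∈ dc := by
  have h := pvEdges_fold_char chs dc [] es hE p
  simpa using h

lemma pvRB_iff {chs : List (List (String × List Int))} {dc : List String}
    {es : List (String × String)} (hE : pvEdges chs dc = some es) (c d : String) :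
    pvRB es c d ↔ pvEdgeCh chs c d ∧ c ∈ dc ∧ d ∈ dc := by
  unfold pvRB pvEdgeCh
  rw [pvEdges_mem hE (c, d), pvEdges_mem hE (d, c)]
  constructor
  · rintro (⟨ch, hch, hd, h1, h2⟩ | ⟨ch, hch, hd, h1, h2⟩)
    · exact ⟨⟨ch, hch, Or.inl hd⟩, h1, h2⟩
    · exact ⟨⟨ch, hch, Or.inr hd⟩, h2, h1⟩
  · rintro ⟨⟨ch, hch, (hd | hd)⟩, h1, h2⟩
    · exact Or.inl ⟨ch, hch, hd, h1, h2⟩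
    · exact Or.inr ⟨ch, hch, hd, h2, h1⟩

lemma pvEdges_dc {chs : List (List (String × List Int))} {dc : List String}
    {es : List (String × String)} (hE : pvEdges chs dc = some es) :
    ∀ e ∈ es, e.1 ∈ dc ∧ e.2 ∈ dc := by
  intro e he
  rcases (pvEdges_mem hE e).mp he with ⟨_, _, _, h1, h2⟩
  exact ⟨h1, h2⟩

-- both builders succeed on Pre_ ---------------------------------------------

lemma pvChCenters_some {ch : List (String × List Int)}
    (hwf : ∃ gs ∈ (List.lookup "gates" ch).toList,
      gs.length = 2 ∧ ∀ g ∈ gs, (List.lookup g pvGateCenter).isSome = true) :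
    (pvChCenters ch).isSome = true := by
  obtain ⟨gs, hgs, hlen, hg⟩ := hwf
  rcases hmem : List.lookup "gates" ch with _ | gs' <;> rw [hmem] at hgs
  · simp at hgs
  · simp only [Option.toList_some, List.mem_singleton] at hgs
    subst hgs
    rcases gs with _ | ⟨g1, _ | ⟨g2, _ | ⟨g3, gs⟩⟩⟩
    · simp at hlen
    · simp at hlen
    · obtain ⟨c1, h1⟩ := Option.isSome_iff_exists.mp (hg g1 (by simp))
      obtain ⟨c2, h2⟩ := Option.isSome_iff_exists.mp (hg g2 (by simp))
      unfold pvChCenters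
      rw [hmem]
      show (match List.lookup g1 pvGateCenter, List.lookup g2 pvGateCenter with
            | some c1, some c2 => some (c1, c2)
            | _, _ => none).isSome = true
      rw [h1, h2]
      rfl
    · simp at hlen

lemma pv_builders_some {chs : List (List (String × List Int))} (dc : List String)
    (hwf : ∀ ch ∈ chs, ∃ gs ∈ (List.lookup "gates" ch).toList,
      gs.length = 2 ∧ ∀ g ∈ gs, (List.lookup g pvGateCenter).isSome = true) :
    (pvBuildAdj chs).isSome = true ∧ (pvEdges chs dc).isSome = true := by
  unfold pvBuildAdj pvEdges
  have main : ∀ (chs' : List (List (String × List Int))),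
      (∀ ch ∈ chs', ∃ gs ∈ (List.lookup "gates" ch).toList,
        gs.length = 2 ∧ ∀ g ∈ gs, (List.lookup g pvGateCenter).isSome = true) →
      ∀ (acc1 : PySem.Dict String (PySem.Set String)) (acc2 : List (String × String)),
      (chs'.foldl (fun acc ch => acc.bind fun adj => pvAdjStep adj ch) (some acc1)).isSome = true ∧
      (chs'.foldl (fun acc ch => acc.bind fun es => pvEdgeStep dc es ch) (some acc2)).isSome = true := by
    intro chs'
    induction chs' with
    | nil => intro _ acc1 acc2; simp
    | cons ch chs' ih =>
      intro hwf' acc1 acc2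
      obtain ⟨cc, hcc⟩ := Option.isSome_iff_exists.mp (pvChCenters_some (hwf' ch (by simp)))
      have ha1 : ∃ a1, pvAdjStep acc1 ch = some a1 := by
        unfold pvAdjStep
        rw [hcc]
        exact ⟨_, rfl⟩
      have ha2 : ∃ a2, pvEdgeStep dc acc2 ch = some a2 := by
        unfold pvEdgeStep
        rw [hcc]
        exact ⟨_, rfl⟩
      obtain ⟨a1, ha1⟩ := ha1
      obtain ⟨a2, ha2⟩ := ha2
      simp only [List.foldl_cons]
      rw [show ((some acc1).bind fun adj => pvAdjStep adj ch) = some a1 from ha1,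
        show ((some acc2).bind fun es => pvEdgeStep dc es ch) = some a2 from ha2]
      exact ih (fun ch' hch' => hwf' ch' (by simp [hch'])) a1 a2
  exact main chs hwf PySem.Dict.empty []

-- A's BFS -------------------------------------------------------------------

lemma pvVisit_fold (dc : List String) : ∀ (ns : List String)
    (v : PySem.Set String) (q : List String),
    (∀ x ∈ q, x ∈ v) → q.Nodup →
    (∀ x ∈ v, x ∈ (ns.foldl (pvVisitStep dc) (v, q)).1) ∧
    (∀ n ∈ ns, n ∈ dc → n ∈ (ns.foldl (pvVisitStep dc) (v, q)).1) ∧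
    (∀ x ∈ q, x ∈ (ns.foldl (pvVisitStep dc) (v, q)).2) ∧
    (∀ x ∈ (ns.foldl (pvVisitStep dc) (v, q)).1, x ∈ v ∨ (x ∈ ns ∧ x ∈ dc)) ∧
    (∀ x ∈ (ns.foldl (pvVisitStep dc) (v, q)).1, x ∈ v ∨ x ∈ (ns.foldl (pvVisitStep dc) (v, q)).2) ∧
    (∀ x ∈ (ns.foldl (pvVisitStep dc) (v, q)).2, x ∈ (ns.foldl (pvVisitStep dc) (v, q)).1) ∧
    (ns.foldl (pvVisitStep dc) (v, q)).2.Nodup ∧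
    (∀ x ∈ (ns.foldl (pvVisitStep dc) (v, q)).2, x ∈ q ∨ x ∉ v) ∧
    (ns.foldl (pvVisitStep dc) (v, q)).2.length + pvCnt dc (ns.foldl (pvVisitStep dc) (v, q)).1
      ≤ q.length + pvCnt dc v := by
  intro ns
  induction ns with
  | nil =>
    intro v q hqv hnd
    exact ⟨fun x hx => hx, by simp, fun x hx => hx, fun x hx => Or.inl hx,
      fun x hx => Or.inl hx, fun x hx => hqv x hx, hnd, fun x hx => Or.inl hx, le_refl _⟩
  | cons n ns ih =>
    intro v q hqv hnd
    simp only [List.foldl_cons]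
    by_cases hg : (dc.contains n && !(v.contains n)) = true
    · have hstep : pvVisitStep dc (v, q) n = (PySem.Set.add v n, q ++ [n]) := by
        unfold pvVisitStep
        rw [if_pos hg]
      rw [hstep]
      have hgp : n ∈ dc ∧ n ∉ v := by
        rw [Bool.and_eq_true] at hg
        exact ⟨by simpa using hg.1, by simpa using hg.2⟩
      have hqv' : ∀ x ∈ q ++ [n], x ∈ PySem.Set.add v n := by
        intro x hx
        rcases List.mem_append.mp hx with hx | hx
        · exact (PySem.Set.mem_add v n x).mpr (Or.inl (hqv x hx))
        · simp only [List.mem_singleton] at hx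
          subst hx
          exact (PySem.Set.mem_add v x x).mpr (Or.inr rfl)
      have hnd' : (q ++ [n]).Nodup := by
        refine hnd.append (List.nodup_singleton n) ?_
        intro x hx hx'
        simp only [List.mem_singleton] at hx'
        subst hx'
        exact hgp.2 (hqv x hx)
      obtain ⟨ia, ib, ic, id', ie, if', ig, ih', ii⟩ := ih (PySem.Set.add v n) (q ++ [n]) hqv' hnd'
      refine ⟨?_, ?_, ?_, ?_, ?_, if', ig, ?_, ?_⟩
      · intro x hx
        exact ia x ((PySem.Set.mem_add v n x).mpr (Or.inl hx))
      · intro n' hn' hdc'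
        rcases List.mem_cons.mp hn' with rfl | hn'
        · exact ia n' ((PySem.Set.mem_add v n' n').mpr (Or.inr rfl))
        · exact ib n' hn' hdc'
      · intro x hx
        exact ic x (List.mem_append.mpr (Or.inl hx))
      · intro x hx
        rcases id' x hx with hx' | hx'
        · rcases (PySem.Set.mem_add v n x).mp hx' with hx'' | rfl
          · exact Or.inl hx''
          · exact Or.inr ⟨by simp, hgp.1⟩
        · exact Or.inr ⟨by simp [hx'.1], hx'.2⟩
      · intro x hx
        rcases ie x hx with hx' | hx'
        · rcases (PySem.Set.mem_add v n x).mp hx' with hx'' | rfl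
          · exact Or.inl hx''
          · exact Or.inr (ic x (List.mem_append.mpr (Or.inr (by simp))))
        · exact Or.inr hx'
      · intro x hx
        rcases ih' x hx with hx' | hx'
        · rcases List.mem_append.mp hx' with hx'' | hx''
          · exact Or.inl hx''
          · simp only [List.mem_singleton] at hx''
            subst hx''
            exact Or.inr hgp.2
        · refine Or.inr (fun hxv => hx' ((PySem.Set.mem_add v n x).mpr (Or.inl hxv)))
      · have hcnt := pvCnt_add hgp.1 hgp.2
        have hii := ii
        simp only [List.length_append, List.length_singleton] at hii
        omega
    · have hstep : pvVisitStep dc (v, q) n = (v, q) := by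
        unfold pvVisitStep
        rw [if_neg hg]
      rw [hstep]
      obtain ⟨ia, ib, ic, id', ie, if', ig, ih', ii⟩ := ih v q hqv hnd
      refine ⟨ia, ?_, ic, ?_, ie, if', ig, ih', ii⟩
      · intro n' hn' hdc'
        rcases List.mem_cons.mp hn' with rfl | hn'
        · have hv : v.contains n' = true := by
            by_contra hc
            apply hg
            rw [Bool.and_eq_true]
            exact ⟨by simpa using hdc', by simpa using hc⟩
          exact ia n' (by simpa using hv)
        · exact ib n' hn' hdc'
      · intro x hx
        rcases id' x hx with hx' | hx'
        · exact Or.inl hx'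
        · exact Or.inr ⟨by simp [hx'.1], hx'.2⟩

lemma pvBFS_sound {adj : PySem.Dict String (PySem.Set String)} {dc : List String} {m : String} :
    ∀ (fuel : Nat) (v : PySem.Set String) (q : List String),
    (∀ x ∈ q, x ∈ v) → q.Nodup → (∀ x ∈ v, pvReachA adj dc m x) →
    pvBFS adj dc v q fuel = true → pvReachA adj dc m "Throat" := by
  intro fuel
  induction fuel with
  | zero => intro v q _ _ _ h; rw [pvBFS_zero] at h; simp at h
  | succ fuel ih =>
    intro v q hqv hnd hreach h
    rcases q with _ | ⟨current, rest⟩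
    · rw [pvBFS_nil] at h; simp at h
    · rw [pvBFS_cons] at h
      by_cases hcur : current = "Throat"
      · have hcv := hreach current (hqv current (by simp))
        rw [hcur] at hcv
        exact hcv
      · rw [if_neg hcur] at h
        obtain ⟨ia, ib, ic, id', ie, if', ig, ih', ii⟩ :=
          pvVisit_fold dc (PySem.Dict.getD adj current PySem.Set.empty) v rest
            (fun x hx => hqv x (by simp [hx])) (List.nodup_cons.mp hnd).2
        refine ih _ _ if' ig ?_ h
        intro x hx
        rcases id' x hx with hx' | hx'
        · exact hreach x hx'
        · exact Relation.ReflTransGen.tail (hreach current (hqv current (by simp)))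
            ⟨hx'.1, hx'.2⟩

lemma pvBFS_closed_contra {adj : PySem.Dict String (PySem.Set String)} {dc : List String}
    {m : String} {v : PySem.Set String}
    (hcl : ∀ x ∈ v, x ≠ "Throat" ∧ ∀ d, pvRA adj dc x d → d ∈ v)
    (hm : m ∈ v) (hr : pvReachA adj dc m "Throat") : False :=
  (hcl _ (pv_reach_subset (fun x hx y hy => (hcl x hx).2 y hy) hr hm)).1 rfl

lemma pvBFS_complete {adj : PySem.Dict String (PySem.Set String)} {dc : List String} {m : String}
    (hr : pvReachA adj dc m "Throat") :
    ∀ (fuel : Nat) (v : PySem.Set String) (q : List String),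
    (∀ x ∈ q, x ∈ v) → q.Nodup →
    (∀ x ∈ v, x ∉ q → x ≠ "Throat" ∧ ∀ d, pvRA adj dc x d → d ∈ v) →
    m ∈ v → q.length + pvCnt dc v ≤ fuel →
    pvBFS adj dc v q fuel = true := by
  intro fuel
  induction fuel with
  | zero =>
    intro v q _ _ hb hm hlen
    exfalso
    have hq : q = [] := by
      cases q with
      | nil => rfl
      | cons a q => simp at hlen
    subst hq
    exact pvBFS_closed_contra (fun x hx => hb x hx (by simp)) hm hr
  | succ fuel ih =>
    intro v q hqv hnd hb hm hlen
    rcases q with _ | ⟨current, rest⟩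
    · exfalso
      exact pvBFS_closed_contra (fun x hx => hb x hx (by simp)) hm hr
    · rw [pvBFS_cons]
      by_cases hcur : current = "Throat"
      · rw [if_pos hcur]
      · rw [if_neg hcur]
        obtain ⟨ia, ib, ic, id', ie, if', ig, ih', ii⟩ :=
          pvVisit_fold dc (PySem.Dict.getD adj current PySem.Set.empty) v rest
            (fun x hx => hqv x (by simp [hx])) (List.nodup_cons.mp hnd).2
        refine ih _ _ if' ig ?_ (ia m hm) ?_
        · intro x hx hnx
          rcases ie x hx with hxv | hxq
          · by_cases hxcur : x = current
            · subst hxcur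
              exact ⟨hcur, fun d hd => ib d hd.1 hd.2⟩
            · by_cases hxrest : x ∈ rest
              · exact absurd (ic x hxrest) hnx
              · have hbx := hb x hxv (by simp [hxcur, hxrest])
                exact ⟨hbx.1, fun d hd => ia d (hbx.2 d hd)⟩
          · exact absurd hxq hnx
        · have hii := ii
          simp only [List.length_cons] at hlen
          omega

-- B's saturation -------------------------------------------------------------

lemma pvGrow_sound {es : List (String × String)} : ∀ (es' : List (String × String))
    (st : PySem.Set String × Bool), (∀ e ∈ es', e ∈ es) →
    (∀ x ∈ st.1, pvReachB es "Throat" x) →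
    ∀ x ∈ (es'.foldl pvGrowStep st).1, pvReachB es "Throat" x := by
  intro es'
  induction es' with
  | nil => intro st _ hst x hx; exact hst x hx
  | cons e es' ih =>
    intro st hsub hst x hx
    simp only [List.foldl_cons] at hx
    refine ih (pvGrowStep st e) (fun e' he' => hsub e' (by simp [he'])) ?_ x hx
    intro y hy
    unfold pvGrowStep at hy
    by_cases hg : (st.1.contains e.1 != st.1.contains e.2) = true
    · rw [if_pos hg] at hy
      have hy' : y ∈ PySem.Set.add (PySem.Set.add st.1 e.1) e.2 := hy
      have hee : e ∈ es := hsub e (by simp)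
      rcases (PySem.Set.mem_add _ _ _).mp hy' with hy'' | rfl
      · rcases (PySem.Set.mem_add _ _ _).mp hy'' with hy''' | rfl
        · exact hst y hy'''
        · cases hc1 : st.1.contains e.1
          · have hc2 : st.1.contains e.2 = true := by
              rw [hc1] at hg
              cases hc2 : st.1.contains e.2
              · rw [hc2] at hg; simp at hg
              · rfl
            exact Relation.ReflTransGen.tail (hst e.2 (by simpa using hc2)) (Or.inr hee)
          · exact hst e.1 (by simpa using hc1)
      · cases hc2 : st.1.contains e.2
        · have hc1 : st.1.contains e.1 = true := by
            rw [hc2] at hg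
            cases hc1 : st.1.contains e.1
            · rw [hc1] at hg; simp at hg
            · rfl
          exact Relation.ReflTransGen.tail (hst e.1 (by simpa using hc1)) (Or.inl hee)
        · exact hst e.2 (by simpa using hc2)
    · rw [if_neg hg] at hy
      exact hst y hy

lemma pvGrow_fold : ∀ (es' : List (String × String)) (st : PySem.Set String × Bool),
    (∀ x ∈ st.1, x ∈ (es'.foldl pvGrowStep st).1) ∧
    (∀ x ∈ (es'.foldl pvGrowStep st).1, x ∈ st.1 ∨ x ∈ pvEndpoints es') ∧
    (st.1.Nodup → (es'.foldl pvGrowStep st).1.Nodup) ∧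
    (st.2 = true → (es'.foldl pvGrowStep st).2 = true) ∧
    ((es'.foldl pvGrowStep st).2 = true → st.2 = true ∨
      st.1.length < (es'.foldl pvGrowStep st).1.length) ∧
    (st.1.length ≤ (es'.foldl pvGrowStep st).1.length) ∧
    ((es'.foldl pvGrowStep st).2 = false → (es'.foldl pvGrowStep st).1 = st.1 ∧
      ∀ e ∈ es', st.1.contains e.1 = st.1.contains e.2) := by
  intro es'
  induction es' with
  | nil =>
    intro st
    exact ⟨fun x hx => hx, fun x hx => Or.inl hx, fun h => h, fun h => h,
      fun h => Or.inl h, le_refl _, fun _ => ⟨rfl, by simp⟩⟩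
  | cons e es' ih =>
    intro st
    simp only [List.foldl_cons]
    by_cases hg : (st.1.contains e.1 != st.1.contains e.2) = true
    · have hstep : pvGrowStep st e = (PySem.Set.add (PySem.Set.add st.1 e.1) e.2, true) := by
        unfold pvGrowStep
        rw [if_pos hg]
      rw [hstep]
      obtain ⟨ia, ib, ic, id', ie, ig, if'⟩ := ih (PySem.Set.add (PySem.Set.add st.1 e.1) e.2, true)
      have hne12 : e.1 ≠ e.2 := by
        intro heq
        rw [heq] at hg
        simp at hg
      have hone : e.2 ∉ st.1 ∨ e.1 ∉ st.1 := by
        cases hc1 : st.1.contains e.1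
        · exact Or.inr (by simpa using hc1)
        · cases hc2 : st.1.contains e.2
          · exact Or.inl (by simpa using hc2)
          · rw [hc1, hc2] at hg; simp at hg
      have hlen : st.1.length < (PySem.Set.add (PySem.Set.add st.1 e.1) e.2).length := by
        rcases hone with hnm2 | hnm1
        · have hnm : e.2 ∉ PySem.Set.add st.1 e.1 := by
            intro hmm
            rcases (PySem.Set.mem_add _ _ _).mp hmm with hc | hc
            · exact hnm2 hc
            · exact hne12 hc.symm
          have hmono := pv_add_len st.1 e.1
          rw [PySem.Set.add_of_not_mem hnm]
          simp only [List.length_append, List.length_singleton]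
          omega
        · rw [PySem.Set.add_of_not_mem hnm1]
          have hmono := pv_add_len (st.1 ++ [e.1]) e.2
          simp only [List.length_append, List.length_singleton] at hmono ⊢
          omega
      refine ⟨?_, ?_, ?_, fun _ => id' rfl, ?_, ?_, ?_⟩
      · intro x hx
        exact ia x ((PySem.Set.mem_add _ _ _).mpr (Or.inl ((PySem.Set.mem_add _ _ _).mpr (Or.inl hx))))
      · intro x hx
        rcases ib x hx with hx' | hx'
        · rcases (PySem.Set.mem_add _ _ _).mp hx' with hx'' | rfl
          · rcases (PySem.Set.mem_add _ _ _).mp hx'' with hx''' | rfl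
            · exact Or.inl hx'''
            · exact Or.inr (by rw [pvEndpoints_cons]; simp)
          · exact Or.inr (by rw [pvEndpoints_cons]; simp)
        · exact Or.inr (by rw [pvEndpoints_cons]; simp [hx'])
      · intro hnd
        exact ic (PySem.Set.nodup_add _ _ (PySem.Set.nodup_add _ _ hnd))
      · intro _
        exact Or.inr (lt_of_lt_of_le hlen ig)
      · exact le_trans (le_of_lt hlen) ig
      · intro hfalse
        rw [id' rfl] at hfalse
        simp at hfalse
    · have hstep : pvGrowStep st e = st := by
        unfold pvGrowStep
        rw [if_neg hg]
      rw [hstep]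
      obtain ⟨ia, ib, ic, id', ie, ig, if'⟩ := ih st
      refine ⟨ia, ?_, ic, id', ie, ig, ?_⟩
      · intro x hx
        rcases ib x hx with hx' | hx'
        · exact Or.inl hx'
        · exact Or.inr (by rw [pvEndpoints_cons]; simp [hx'])
      · intro hfalse
        obtain ⟨h1, h2⟩ := if' hfalse
        refine ⟨h1, ?_⟩
        intro e' he'
        rcases List.mem_cons.mp he' with rfl | he'
        · simpa using hg
        · exact h2 e' he'

lemma pvEndpoints_length : ∀ (es : List (String × String)),
    (pvEndpoints es).length = 2 * es.length := by
  intro es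
  induction es with
  | nil => rfl
  | cons e es ih =>
    rw [pvEndpoints_cons]
    simp only [List.length_cons] at ih ⊢
    omega

lemma pvSat_spec (es : List (String × String)) : ∀ (fuel : Nat) (comp : PySem.Set String),
    comp.Nodup → "Throat" ∈ comp → (∀ x ∈ comp, x = "Throat" ∨ x ∈ pvEndpoints es) →
    (∀ x ∈ comp, pvReachB es "Throat" x) →
    2 * es.length + 2 ≤ fuel + comp.length →
    "Throat" ∈ pvSat es comp fuel ∧ (∀ x ∈ pvSat es comp fuel, pvReachB es "Throat" x) ∧
      (∀ e ∈ es, ((e.1 ∈ pvSat es comp fuel) ↔ (e.2 ∈ pvSat es comp fuel))) := by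
  intro fuel
  induction fuel with
  | zero =>
    intro comp hnd hT hsub _ hlen
    exfalso
    have hub : comp.length ≤ 2 * es.length + 1 := by
      have hle := pv_nodup_length_le hnd (l' := "Throat" :: pvEndpoints es) ?_
      · rw [List.length_cons, pvEndpoints_length] at hle
        omega
      · intro x hx
        rcases hsub x hx with rfl | hx'
        · simp
        · simp [hx']
    omega
  | succ fuel ih =>
    intro comp hnd hT hsub hreach hlen
    have hpg : pvGrow es (comp, false) = es.foldl pvGrowStep (comp, false) := rfl
    obtain ⟨ia, ib, ic, _, ie, ig, if'⟩ := pvGrow_fold es (comp, false)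
    cases hch : (pvGrow es (comp, false)).2
    · have hred : pvSat es comp (fuel + 1) = (pvGrow es (comp, false)).1 := by
        rw [pvSat_succ, hch]
        simp
      rw [hred]
      rw [hpg] at hch
      obtain ⟨heq, hcl⟩ := if' hch
      rw [hpg, heq]
      refine ⟨hT, hreach, ?_⟩
      intro e he
      have hce := hcl e he
      constructor
      · intro h1
        have h2 : comp.contains e.2 = true := by
          rw [← hce]
          simpa using h1
        simpa using h2
      · intro h2
        have h1 : comp.contains e.1 = true := by
          rw [hce]
          simpa using h2
        simpa using h1
    · have hred : pvSat es comp (fuel + 1) = pvSat es (pvGrow es (comp, false)).1 fuel := by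
        rw [pvSat_succ, hch]
        simp
      rw [hred]
      have hgrow : ∀ x ∈ (pvGrow es (comp, false)).1, pvReachB es "Throat" x := by
        rw [hpg]
        exact pvGrow_sound es (comp, false) (fun e he => he) hreach
      rw [hpg] at hch ⊢
      have hlt : comp.length < (es.foldl pvGrowStep (comp, false)).1.length := by
        rcases ie hch with hcontra | hlt
        · simp at hcontra
        · exact hlt
      refine ih (es.foldl pvGrowStep (comp, false)).1 (ic hnd) (ia "Throat" hT) ?_ ?_ (by omega)
      · intro x hx
        rcases ib x hx with hx' | hx'
        · exact hsub x hx'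
        · exact Or.inr hx'
      · rw [← hpg]
        exact hgrow

-- the bridge between A's reachability and B's --------------------------------

lemma pvReachA_to_B {chs : List (List (String × List Int))} {dc : List String}
    {adj : PySem.Dict String (PySem.Set String)} {es : List (String × String)}
    (hA : pvBuildAdj chs = some adj) (hE : pvEdges chs dc = some es)
    {x y : String} (hx : x ∈ dc) (h : pvReachA adj dc x y) : pvReachB es x y := by
  unfold pvReachA at h
  induction h using Relation.ReflTransGen.head_induction_on with
  | refl => exact Relation.ReflTransGen.refl
  | head hac hcb ihstep =>
    rename_i a c
    have hcdc : c ∈ dc := hac.2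
    have hedge : pvEdgeCh chs a c := (pvAdj_mem hA a c).mp hac.1
    have hrb : pvRB es a c := (pvRB_iff hE a c).mpr ⟨hedge, hx, hcdc⟩
    exact Relation.ReflTransGen.head hrb (ihstep hcdc)

lemma pvReachB_to_A {chs : List (List (String × List Int))} {dc : List String}
    {adj : PySem.Dict String (PySem.Set String)} {es : List (String × String)}
    (hA : pvBuildAdj chs = some adj) (hE : pvEdges chs dc = some es)
    {x y : String} (h : pvReachB es x y) : pvReachA adj dc x y := by
  refine Relation.ReflTransGen.mono ?_ h
  intro a b hab
  have hrb := (pvRB_iff hE a b).mp hab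
  exact ⟨(pvAdj_mem hA a b).mpr hrb.1, hrb.2.2⟩

lemma pvRB_symm {es : List (String × String)} : ∀ a b, pvRB es a b → pvRB es b a := by
  intro a b hab
  rcases hab with h | h
  · exact Or.inr h
  · exact Or.inl h

-- the per-motor equality ------------------------------------------------------

lemma pv_motor_case {chs : List (List (String × List Int))} {dc : List String}
    {adj : PySem.Dict String (PySem.Set String)} {es : List (String × String)}
    (hA : pvBuildAdj chs = some adj) (hE : pvEdges chs dc = some es)
    {m : String} (hmT : m ≠ "Throat") :
    (if dc.contains m then pvBFS adj dc [m] [m] (dc.length + 1) else false)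
      = (pvSat es ["Throat"] (2 * es.length + 1)).contains m := by
  obtain ⟨hTR, hsound, hclosed⟩ := pvSat_spec es (2 * es.length + 1) ["Throat"]
    (List.nodup_singleton _) (by simp)
    (fun x hx => Or.inl (List.mem_singleton.mp hx))
    (by intro x hx
        rw [List.mem_singleton] at hx
        subst hx
        exact Relation.ReflTransGen.refl)
    (by simp only [List.length_singleton]; omega)
  apply pv_bool_eq
  constructor
  · intro hL
    cases hdc : dc.contains m
    · rw [hdc] at hL; simp at hL
    · rw [hdc] at hL
      simp only [if_true] at hL
      have hmem : m ∈ dc := by simpa using hdc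
      have hreach : pvReachA adj dc m "Throat" :=
        pvBFS_sound (dc.length + 1) [m] [m] (fun x hx => hx) (List.nodup_singleton m)
          (by intro x hx
              rw [List.mem_singleton] at hx
              subst hx
              exact Relation.ReflTransGen.refl) hL
      have hTb : pvReachB es "Throat" m :=
        pv_reach_symm pvRB_symm (pvReachA_to_B hA hE hmem hreach)
      have hin : m ∈ pvSat es ["Throat"] (2 * es.length + 1) := by
        refine pv_reach_subset ?_ hTb hTR
        intro x hx y hy
        rcases hy with hy | hy
        · exact (hclosed _ hy).mp hx
        · exact (hclosed _ hy).mpr hx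
      simpa using hin
  · intro hR
    have hmem : m ∈ pvSat es ["Throat"] (2 * es.length + 1) := by simpa using hR
    have hTb : pvReachB es "Throat" m := hsound m hmem
    have hmdc : m ∈ dc := by
      rcases Relation.ReflTransGen.cases_tail hTb with h | ⟨c, _, hstep⟩
      · exact absurd h hmT
      · rcases hstep with h | h
        · exact (pvEdges_dc hE _ h).2
        · exact (pvEdges_dc hE _ h).1
    have hreach : pvReachA adj dc m "Throat" :=
      pvReachB_to_A hA hE (pv_reach_symm pvRB_symm hTb)
    rw [if_pos (by simpa using hmdc)]
    refine pvBFS_complete hreach (dc.length + 1) [m] [m] (fun x hx => hx)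
      (List.nodup_singleton m) (fun x hx hnx => absurd hx hnx) (by simp) ?_
    have hc := pvCnt_le dc [m]
    simp only [List.length_singleton]
    omega

-- ===== VERDICT (by name: the statement is the Claim_ definition above) =====
theorem motor_to_throat_py_spec : Claim_equal_motor_to_throat_py := by
  intro chs dc hdom hpre
  unfold Spec_motor_to_throat_py
  by_cases hT : dc.contains "Throat" = true
  · have hTm : "Throat" ∈ dc := by simpa using hT
    obtain ⟨hAs, hEs⟩ := pv_builders_some dc (hpre hTm)
    obtain ⟨adj, hA⟩ := Option.isSome_iff_exists.mp hAs
    obtain ⟨es, hE⟩ := Option.isSome_iff_exists.mp hEs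
    have hgA : motor_to_throat_py chs dc = pvMotors.any (fun motor =>
        if dc.contains motor then pvBFS adj dc [motor] [motor] (dc.length + 1) else false) := by
      unfold motor_to_throat_py
      rw [hT, hA]
      rfl
    have hgB : motor_to_throat_py_alt chs dc = pvMotors.any (fun m =>
        (pvSat es ["Throat"] (2 * es.length + 1)).contains m) := by
      unfold motor_to_throat_py_alt
      rw [hT, hE]
      rfl
    rw [hgA, hgB]
    have key : ∀ m, m ∈ pvMotors →
        (if dc.contains m then pvBFS adj dc [m] [m] (dc.length + 1) else false)
          = (pvSat es ["Throat"] (2 * es.length + 1)).contains m := by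
      intro m hm
      have hmT : m ≠ "Throat" := by
        simp only [pvMotors, List.mem_cons, List.not_mem_nil, or_false] at hm
        rcases hm with rfl | rfl | rfl | rfl <;> decide
      exact pv_motor_case hA hE hmT
    simp only [pvMotors, List.any_cons, List.any_nil]
    rw [key "Sacral" (by simp [pvMotors]), key "Root" (by simp [pvMotors]),
      key "Solar Plexus" (by simp [pvMotors]), key "Heart" (by simp [pvMotors])]
  · have hT' : dc.contains "Throat" = false := by simpa using hT
    have h1 : motor_to_throat_py chs dc = false := by
      unfold motor_to_throat_py
      rw [hT']
      rfl
    have h2 : motor_to_throat_py_alt chs dc = false := by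
      unfold motor_to_throat_py_alt
      rw [hT']
      rfl
    rw [h1, h2]
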